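-- pv_equiv track=rewrite | github.com/henri-branken-matogen/henri_libs | custom_udfs/my_udfs.py | generate_mob_prof
-- ===== SOURCE A (Python) =====
-- def generate_mob_prof(mob_start):
--     """
--     Given the Months-On-Book value, in integer format, for Month-01, the function generates a full string profile for
--     the entire observation period of 60 Months.
--     :param mob_start: The Month-01 Months-On-Book value.
--     :return: A 60-month string profile representing the Months-On-Book profile over a period of 60 months.
--     """
--     ls_raw_mob = [mob_start]
--     x = mob_start
--     for i in range(59):
--         x -= 1
--         ls_raw_mob.append(x)
--     ls_fix_mob = [None if x < 0 else x if x <= 99 else 99 for x in ls_raw_mob]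
--     ls_str_mob = [".." if x is None else str(x).zfill(2) for x in ls_fix_mob]
--     str_prof_1 = "|".join(ls_str_mob) + "|"
--     return str_prof_1
-- ===== SOURCE B (Python) =====
-- def generate_mob_prof(mob_start):
--     # Segment construction: the 60 monthly values descend by 1, so the profile is
--     # a run of "99" (values above the cap), then the exact two-digit countdown,
--     # then a run of ".." (negative values); the three run lengths are computed
--     # arithmetically instead of testing every month.
--     n_hi = max(0, min(60, mob_start - 99))
--     n_mid = max(0, min(60, mob_start + 1)) - n_hi
--     n_neg = 60 - n_hi - n_mid
--     top = min(mob_start, 99)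
--     parts = ["99"] * n_hi \
--         + [str(top - j).zfill(2) for j in range(n_mid)] \
--         + [".."] * n_neg
--     return "|".join(parts) + "|"
-- ===== Notes on version B (the rewrite author's own statement) =====
-- stated objective: alternative
-- what changed: Replaces A's decrementing accumulator loop plus two clamp/format mapping passes with run-length segment construction: since the 60 values descend by 1, B computes the lengths of the '99' run, the exact two-digit countdown run and the '..' run arithmetically and concatenates the three segments without testing any month.
import Mathlib
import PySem

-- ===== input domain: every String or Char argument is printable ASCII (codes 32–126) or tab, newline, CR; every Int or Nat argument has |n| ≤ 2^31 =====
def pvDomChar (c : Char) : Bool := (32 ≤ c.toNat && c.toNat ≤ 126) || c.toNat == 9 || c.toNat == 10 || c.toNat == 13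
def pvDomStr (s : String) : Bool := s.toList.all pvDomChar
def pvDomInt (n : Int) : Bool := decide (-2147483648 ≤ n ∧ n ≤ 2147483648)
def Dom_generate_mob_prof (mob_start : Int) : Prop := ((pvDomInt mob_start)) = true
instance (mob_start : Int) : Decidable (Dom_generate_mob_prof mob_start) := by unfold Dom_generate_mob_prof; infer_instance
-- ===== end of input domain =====

-- B replaces A's per-month decrement/clamp/format passes by run-length segment
-- construction (three arithmetically-sized runs concatenated); objective: alternative.

-- ===== PORT A =====
def generate_mob_prof (mob_start : Int) : String :=
  let st :=
    (PySem.List.pyRange 0 59 1).foldl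
      (fun (st : Int × List Int) _ => (st.1 - 1, st.2 ++ [st.1 - 1]))
      (mob_start, [mob_start])
  let ls_raw_mob := st.2
  let ls_fix_mob := ls_raw_mob.map
    (fun x => if x < 0 then none else if x ≤ 99 then some x else some 99)
  let ls_str_mob := ls_fix_mob.map
    (fun x? => match x? with
      | none => ".."
      | some v => PySem.Str.zfill (PySem.Int.toStr v) 2)
  PySem.Str.join "|" ls_str_mob ++ "|"

-- ===== PORT B =====
def generate_mob_prof_alt (mob_start : Int) : String :=
  let n_hi := max 0 (min 60 (mob_start - 99))
  let n_mid := max 0 (min 60 (mob_start + 1)) - n_hi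
  let n_neg := 60 - n_hi - n_mid
  let top := min mob_start 99
  let parts :=
    List.replicate n_hi.toNat "99"
    ++ (PySem.List.pyRange 0 n_mid 1).map
        (fun j => PySem.Str.zfill (PySem.Int.toStr (top - j)) 2)
    ++ List.replicate n_neg.toNat ".."
  PySem.Str.join "|" parts ++ "|"

-- ===== PRECONDITION & SPEC =====
def Spec_generate_mob_prof (mob_start : Int) (out : String) : Prop := out = generate_mob_prof_alt mob_start
instance (mob_start : Int) (out : String) : Decidable (Spec_generate_mob_prof mob_start out) := by unfold Spec_generate_mob_prof; infer_instance

-- ===== CLAIM (what is proved, stated in full; the proofs are below) =====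
def Claim_equal_generate_mob_prof : Prop := ∀ (mob_start : Int), Dom_generate_mob_prof mob_start → Spec_generate_mob_prof mob_start (generate_mob_prof mob_start)

-- ===== LEMMAS AND PROOFS =====

-- A's accumulator loop over `range n` unrolled: final state is a closed form.
lemma mob_fold_closed (n : Nat) (x : Int) (acc : List Int) :
    ((List.range n).foldl
      (fun (st : Int × List Int) _ => (st.1 - 1, st.2 ++ [st.1 - 1]))
      (x, acc)) =
    (x - n, acc ++ (List.range n).map (fun (k : Nat) => x - 1 - (k : Int))) := by
  induction n with
  | zero => simp
  | succ m ih =>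
      rw [List.range_succ, List.foldl_append, ih, List.map_append]
      simp only [List.foldl_cons, List.foldl_nil, List.map_cons, List.map_nil,
        List.append_assoc, Prod.mk.injEq]
      refine ⟨by push_cast; ring, ?_⟩
      congr 3
      ring

-- A's raw list (head plus 59 decrements) is the closed-form 60-term list.
lemma mob_raw_list_eq (m : Int) :
    m :: (List.range 59).map (fun (k : Nat) => m - 1 - (k : Int)) =
    (List.range 60).map (fun (k : Nat) => m - (k : Int)) := by
  apply List.ext_getElem
  · simp
  · intro i h1 h2
    match i with
    | 0 => simp
    | Nat.succ n =>
        simp only [List.getElem_cons_succ, List.getElem_map, List.getElem_range]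
        push_cast
        ring

-- The per-month clamp-and-format function A applies to value m - k.
def mobFmt (m : Int) (k : Nat) : String :=
  match (if m - k < 0 then none else if m - k ≤ 99 then some (m - k) else some (99 : Int)) with
  | none => ".."
  | some v => PySem.Str.zfill (PySem.Int.toStr v) 2

-- A's string list is mobFmt mapped over the 60 month indices.
lemma mob_A_list (m : Int) :
    ((((PySem.List.pyRange 0 59 1).foldl
        (fun (st : Int × List Int) _ => (st.1 - 1, st.2 ++ [st.1 - 1]))
        (m, [m])).2.map
      (fun x => if x < 0 then none else if x ≤ 99 then some x else some (99 : Int))).map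
      (fun x? => match x? with
        | none => (".." : String)
        | some v => PySem.Str.zfill (PySem.Int.toStr v) 2)) =
    (List.range 60).map (mobFmt m) := by
  rw [PySem.List.pyRange_one 0 59, List.foldl_map, mob_fold_closed]
  have h59 : (((59 : Int) - 0).toNat) = 59 := by decide
  rw [h59]
  simp only [List.singleton_append]
  rw [mob_raw_list_eq m]
  simp only [List.map_map]
  rfl

lemma mob_fmt_hi (m : Int) (k : Nat) (h : 99 < m - k) : mobFmt m k = "99" := by
  unfold mobFmt
  rw [if_neg (by omega), if_neg (by omega)]
  decide

lemma mob_fmt_mid (m : Int) (k : Nat) (h0 : 0 ≤ m - k) (h99 : m - k ≤ 99) :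
    mobFmt m k = PySem.Str.zfill (PySem.Int.toStr (m - k)) 2 := by
  unfold mobFmt
  rw [if_neg (by omega), if_pos h99]

lemma mob_fmt_neg (m : Int) (k : Nat) (h : m - k < 0) : mobFmt m k = ".." := by
  unfold mobFmt
  rw [if_pos h]

-- B's three segments together are mobFmt mapped over the 60 month indices.
lemma mob_B_list (m : Int) :
    (List.replicate (max 0 (min 60 (m - 99))).toNat "99"
    ++ (PySem.List.pyRange 0 (max 0 (min 60 (m + 1)) - max 0 (min 60 (m - 99))) 1).map
        (fun j => PySem.Str.zfill (PySem.Int.toStr (min m 99 - j)) 2)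
    ++ List.replicate (60 - max 0 (min 60 (m - 99)) - (max 0 (min 60 (m + 1)) - max 0 (min 60 (m - 99)))).toNat "..") =
    (List.range 60).map (mobFmt m) := by
  rw [PySem.List.pyRange_one, sub_zero]
  set a := (max 0 (min 60 (m - 99))).toNat with ha
  set b := (max 0 (min 60 (m + 1)) - max 0 (min 60 (m - 99))).toNat with hb
  set c := (60 - max 0 (min 60 (m - 99)) - (max 0 (min 60 (m + 1)) - max 0 (min 60 (m - 99)))).toNat with hc
  have h60 : (60 : Nat) = a + b + c := by omega
  rw [h60, List.range_add, List.range_add, List.map_append, List.map_append,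
    List.map_map, List.map_map, List.map_map]
  have h1 : (List.range a).map (mobFmt m) = List.replicate a "99" := by
    have hseg : ∀ k ∈ List.range a, mobFmt m k = (fun _ => "99") k := by
      intro k hk
      rw [List.mem_range] at hk
      exact mob_fmt_hi m k (by omega)
    rw [List.map_congr_left hseg, List.map_const', List.length_range]
  have h2 : (List.range b).map (mobFmt m ∘ fun x => a + x) =
      (List.range b).map
        ((fun j => PySem.Str.zfill (PySem.Int.toStr (min m 99 - j)) 2) ∘ fun (k : Nat) => (0 : Int) + k) := by
    apply List.map_congr_left
    intro k hk
    rw [List.mem_range] at hk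
    simp only [Function.comp_apply]
    rw [mob_fmt_mid m (a + k) (by push_cast; omega) (by push_cast; omega)]
    have harg : m - ((a + k : Nat) : Int) = min m 99 - ((0 : Int) + (k : Int)) := by push_cast; omega
    rw [harg]
  have h3 : (List.range c).map (mobFmt m ∘ fun x => a + b + x) = List.replicate c ".." := by
    have hseg : ∀ k ∈ List.range c, (mobFmt m ∘ fun x => a + b + x) k = (fun _ => "..") k := by
      intro k hk
      rw [List.mem_range] at hk
      exact mob_fmt_neg m (a + b + k) (by push_cast; omega)
    rw [List.map_congr_left hseg, List.map_const', List.length_range]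
  rw [h1, h2, h3]

theorem generate_mob_prof_spec : Claim_equal_generate_mob_prof := by
  intro mob_start _
  unfold Spec_generate_mob_prof
  simp only [generate_mob_prof, generate_mob_prof_alt]
  rw [mob_A_list, ← mob_B_list]
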